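-- pv_equiv track=rewrite | github.com/benquick123/code-profiling | code/batch-1/vse-naloge-brez-testov/DN6-M-101.py | zadnji_tvit
-- ===== SOURCE A (Python) =====
-- def zadnji_tvit(tviti):
--     s = {}
--     for i in tviti:
--         deli = i.split(": ", 1)
--         avtorji = deli[0]
--         besedil = deli[1]
--         s[avtorji] = besedil
--     return (s)
-- ===== SOURCE B (Python) =====
-- def zadnji_tvit(tviti):
--     # Two-pass alternative: split once, take last values via a reverse scan,
--     # then emit in first-occurrence author order (matches dict insertion order of A).
--     pairs = [line.split(": ", 1) for line in tviti]
--     last = {}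
--     for a, t in reversed(pairs):
--         if a not in last:
--             last[a] = t
--     order = []
--     seen = set()
--     for a, _ in pairs:
--         if a not in seen:
--             seen.add(a)
--             order.append(a)
--     return {a: last[a] for a in order}
-- ===== Notes on version B (the rewrite author's own statement) =====
-- stated objective: alternative
-- what changed: Replaces the single forward overwrite loop by a split-once pass, a reverse scan keeping the first-seen (= last overall) text per author, and a first-occurrence order pass that reassembles the dict.
import Mathlib
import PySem

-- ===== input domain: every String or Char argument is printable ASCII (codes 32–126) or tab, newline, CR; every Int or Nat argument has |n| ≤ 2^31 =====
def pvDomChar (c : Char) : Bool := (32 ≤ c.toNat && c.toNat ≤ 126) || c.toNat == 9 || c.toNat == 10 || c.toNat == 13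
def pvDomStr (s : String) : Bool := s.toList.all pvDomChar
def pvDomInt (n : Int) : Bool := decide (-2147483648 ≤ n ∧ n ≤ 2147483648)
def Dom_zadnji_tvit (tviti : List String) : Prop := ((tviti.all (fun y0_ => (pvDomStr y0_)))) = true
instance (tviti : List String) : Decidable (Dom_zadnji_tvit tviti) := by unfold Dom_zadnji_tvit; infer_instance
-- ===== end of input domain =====

-- B is an alternative decomposition of the same O(n) task: split once, a reverse
-- scan keeps the last text per author, a forward pass fixes first-occurrence order.

-- ===== PORT A =====
-- i.split(": ", 1): sep ≠ "", so splitMax? is always some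
def pvSplit (i : String) : List String := (PySem.Str.splitMax? i ": " 1).getD []

def zadnji_tvit (tviti : List String) : List (String × String) :=
  (tviti.foldl (fun s i =>
      let deli := pvSplit i
      let avtorji := ((PySem.List.pyGet? deli (0 : Int)).getD "")
      -- deli[1] raises IndexError iff ": " not in i — excluded by Pre_; getD never hit there
      let besedil := ((PySem.List.pyGet? deli (1 : Int)).getD "")
      s.insert avtorji besedil) PySem.Dict.empty).items

-- ===== PORT B =====
def zadnji_tvit_alt (tviti : List String) : List (String × String) :=
  let pairs := tviti.map (fun line =>
      ((PySem.List.pyGet? (pvSplit line) (0 : Int)).getD "",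
       (PySem.List.pyGet? (pvSplit line) (1 : Int)).getD ""))
  let last := pairs.reverse.foldl
      (fun d p => if d.contains p.1 then d else d.insert p.1 p.2) PySem.Dict.empty
  let so := pairs.foldl
      (fun (st : PySem.Set String × List String) p =>
        if PySem.Set.contains st.1 p.1 then st else (PySem.Set.add st.1 p.1, st.2 ++ [p.1]))
      (PySem.Set.empty, [])
  -- last[a]: a is always a key of last (KeyError impossible), so getD is exact
  (so.2.foldl (fun d a => d.insert a (last.getD a "")) PySem.Dict.empty).items

-- ===== PRECONDITION & SPEC =====
-- Pre_ excludes exactly the lines without ": ", on which both Pythons raise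
-- (A an IndexError on deli[1], B a ValueError on unpacking).
def Pre_zadnji_tvit (tviti : List String) : Prop :=
  ∀ i ∈ tviti, PySem.Str.isIn ": " i = true
instance (tviti : List String) : Decidable (Pre_zadnji_tvit tviti) := by
  unfold Pre_zadnji_tvit; infer_instance

def pvWitness_zadnji_tvit : List String := ["ana: hej", "bor: zdravo", "ana: adijo"]

def Spec_zadnji_tvit (tviti : List String) (out : List (String × String)) : Prop := out = zadnji_tvit_alt tviti
instance (tviti : List String) (out : List (String × String)) : Decidable (Spec_zadnji_tvit tviti out) := by unfold Spec_zadnji_tvit; infer_instance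

-- ===== CLAIM (what is proved, stated in full; the proofs are below) =====
def Claim_equal_zadnji_tvit : Prop := ∀ (tviti : List String), Dom_zadnji_tvit tviti → Pre_zadnji_tvit tviti → Spec_zadnji_tvit tviti (zadnji_tvit tviti)

-- ===== LEMMAS AND PROOFS =====

-- the text attached to author k by the LAST matching pair of ps, if any
def pvLastv (ps : List (String × String)) (k : String) : Option String :=
  ps.foldl (fun acc p => if p.1 = k then some p.2 else acc) none

theorem pvLastv_acc (ps : List (String × String)) (acc : Option String) (k : String) :
    ps.foldl (fun acc p => if p.1 = k then some p.2 else acc) acc = (pvLastv ps k).or acc := by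
  induction ps generalizing acc with
  | nil => simp [pvLastv]
  | cons p ps ih =>
    simp only [pvLastv, List.foldl_cons] at *
    rw [ih, ih (if p.1 = k then some p.2 else none)]
    by_cases h : p.1 = k <;> simp [h]

theorem pvLastv_cons (p : String × String) (ps : List (String × String)) (k : String) :
    pvLastv (p :: ps) k = (pvLastv ps k).or (if p.1 = k then some p.2 else none) := by
  simp only [pvLastv, List.foldl_cons]
  exact pvLastv_acc ps _ k

-- A's loop: the last insertion wins
theorem get?_foldl_insert (ps : List (String × String)) (d : PySem.Dict String String)
    (k : String) :
    (ps.foldl (fun d p => d.insert p.1 p.2) d).get? k = (pvLastv ps k).or (d.get? k) := by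
  induction ps generalizing d with
  | nil => simp [pvLastv]
  | cons p ps ih =>
    rw [List.foldl_cons, ih, pvLastv_cons, Option.or_assoc]
    by_cases h : k = p.1
    · subst h; simp [PySem.Dict.get?_insert_self]
    · rw [PySem.Dict.get?_insert_of_ne _ _ h]
      simp [Ne.symm h]

-- B's reverse loop with the "not already present" guard: the first-from-the-end
-- wins, which is again the last insertion of ps
theorem get?_foldl_guard (ps : List (String × String)) (d : PySem.Dict String String)
    (k : String) :
    (ps.reverse.foldl (fun d p => if d.contains p.1 then d else d.insert p.1 p.2) d).get? k
      = (d.get? k).or (pvLastv ps k) := by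
  induction ps generalizing d with
  | nil => simp [pvLastv]
  | cons p ps ih =>
    rw [List.reverse_cons, List.foldl_append, List.foldl_cons, List.foldl_nil, pvLastv_cons]
    set E := ps.reverse.foldl (fun d p => if d.contains p.1 then d else d.insert p.1 p.2) d with hE
    have hEk : E.get? k = (d.get? k).or (pvLastv ps k) := ih d
    by_cases hc : E.contains p.1 = true
    · rw [if_pos hc]
      by_cases h : k = p.1
      · rw [← h] at hc
        rw [PySem.Dict.contains_eq_isSome_get?] at hc
        rcases Option.isSome_iff_exists.mp hc with ⟨v, hv⟩
        rw [if_pos h.symm, hEk, ← Option.or_assoc, ← hEk, hv]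
        simp
      · rw [hEk]; simp [Ne.symm h]
    · rw [if_neg hc]
      by_cases h : k = p.1
      · rw [← h] at hc
        have hnone : (d.get? k).or (pvLastv ps k) = none := by
          rw [← hEk, PySem.Dict.get?_eq_none_iff_contains]
          exact eq_false_of_ne_true hc
        rw [if_pos h.symm, ← h, PySem.Dict.get?_insert_self, ← Option.or_assoc, hnone]
        simp
      · rw [PySem.Dict.get?_insert_of_ne _ _ h, hEk]
        simp [Ne.symm h]

-- B's seen/order loop: both components stay equal and accumulate Set.update
theorem foldl_seen_order (ps : List (String × String)) (s : PySem.Set String) :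
    ps.foldl
      (fun (st : PySem.Set String × List String) p =>
        if PySem.Set.contains st.1 p.1 then st else (PySem.Set.add st.1 p.1, st.2 ++ [p.1]))
      (s, s)
      = (PySem.Set.update s (ps.map (·.1)), PySem.Set.update s (ps.map (·.1))) := by
  induction ps generalizing s with
  | nil => simp [PySem.Set.update]
  | cons p ps ih =>
    rw [List.foldl_cons, List.map_cons, PySem.Set.update_cons]
    by_cases hc : PySem.Set.contains s p.1 = true
    · have hmem : p.1 ∈ s := (PySem.Set.contains_iff s p.1).mp hc
      have hadd : PySem.Set.add s p.1 = s := by simp [PySem.Set.add, hmem]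
      rw [if_pos hc, hadd]
      exact ih s
    · have hmem : p.1 ∉ s := fun hm => hc ((PySem.Set.contains_iff s p.1).mpr hm)
      have hadd : PySem.Set.add s p.1 = s ++ [p.1] := by simp [PySem.Set.add, hmem]
      rw [if_neg hc, hadd]
      exact ih (s ++ [p.1])

-- the common normal form of both ports, over the split pairs
theorem items_canon (ps : List (String × String)) :
    (ps.foldl (fun d p => d.insert p.1 p.2) PySem.Dict.empty).items
      = (PySem.Set.ofList (ps.map (·.1))).map (fun k => (k, (pvLastv ps k).getD "")) := by
  have hnd : (ps.foldl (fun d p => d.insert p.1 p.2) PySem.Dict.empty).keys.Nodup :=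
    PySem.Dict.nodup_keys_foldl_insert_key ps (fun p => p.1) (fun _ p => p.2) _ (by simp)
  have hkeys : (ps.foldl (fun d p => d.insert p.1 p.2) PySem.Dict.empty).keys
      = PySem.Set.ofList (ps.map (·.1)) :=
    (PySem.Dict.keys_foldl_insert_key ps (fun p => p.1) (fun _ p => p.2)
      PySem.Dict.empty).trans
      (by rw [show (PySem.Dict.empty : PySem.Dict String String).keys = [] from rfl,
              PySem.Set.update_nil_left])
  rw [PySem.Dict.items_eq_map_keys _ hnd "", hkeys]
  refine List.map_congr_left (fun k _ => ?_)
  rw [PySem.Dict.getD_eq_get?_getD, get?_foldl_insert]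
  simp

theorem zadnji_tvit_eq_alt (tviti : List String) :
    zadnji_tvit tviti = zadnji_tvit_alt tviti := by
  unfold zadnji_tvit zadnji_tvit_alt
  simp only []
  set f : String → String × String := fun line =>
    ((PySem.List.pyGet? (pvSplit line) (0 : Int)).getD "",
     (PySem.List.pyGet? (pvSplit line) (1 : Int)).getD "") with hf
  set ps := tviti.map f with hps
  -- A's loop over the lines is the insert loop over the split pairs
  have hA : (tviti.foldl (fun s i =>
      let deli := pvSplit i
      let avtorji := ((PySem.List.pyGet? deli (0 : Int)).getD "")
      let besedil := ((PySem.List.pyGet? deli (1 : Int)).getD "")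
      s.insert avtorji besedil) PySem.Dict.empty)
      = ps.foldl (fun d p => d.insert p.1 p.2) PySem.Dict.empty := by
    rw [hps, List.foldl_map]
  rw [hA, items_canon]
  -- B's seen/order loop produces the first-occurrence author list
  rw [show (PySem.Set.empty, ([] : List String))
        = ((([] : List String) : PySem.Set String), ([] : List String)) from rfl]
  rw [foldl_seen_order ps []]
  rw [PySem.Set.update_nil_left]
  set S := PySem.Set.ofList (ps.map (·.1)) with hS
  set L := ps.reverse.foldl
      (fun d p => if d.contains p.1 then d else d.insert p.1 p.2) PySem.Dict.empty with hL
  have hfresh : ∀ a ∈ S, (PySem.Dict.empty : PySem.Dict String String).contains a = false := by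
    intro a _; simp
  have hndS : (S.map (fun a => a)).Nodup := by
    rw [List.map_id']
    exact hS ▸ PySem.Set.nodup_ofList (ps.map (·.1))
  have hB : (S.foldl (fun d a => d.insert a (L.getD a "")) PySem.Dict.empty).items
      = S.map (fun a => (a, L.getD a "")) := by
    have h := PySem.Dict.items_foldl_insert_fresh S (fun a => a) (fun a => L.getD a "")
      PySem.Dict.empty hfresh hndS
    exact h.trans (by simp [show (PySem.Dict.empty : PySem.Dict String String).items = [] from rfl])
  rw [hB]
  refine (List.map_congr_left (fun k _ => ?_)).symm
  rw [PySem.Dict.getD_eq_get?_getD, hL, get?_foldl_guard]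
  simp

-- ===== VERDICT (by name: the statement is the Claim_ definition above) =====
theorem zadnji_tvit_spec : Claim_equal_zadnji_tvit := by
  intro tviti _ _
  show zadnji_tvit tviti = zadnji_tvit_alt tviti
  exact zadnji_tvit_eq_alt tviti
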